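-- pv_equiv track=rewrite | github.com/TonyMcFly80/Curso_Python | 10_Funciones_Lambda.py | divisores
-- ===== SOURCE A (Python) =====
-- def divisores(num):
--     """
--     Busca todos los divisores de un número entero introducido, y si tiene 5 o más la devuelve.
--     :param num: Número entero solicitado.
--     :return: Devuelve el número si este tiene 5 o más divisores.
--     """
--     count = 0
--
--     for i in range(1, num + 1):
--
--         if num % i == 0:
--             count += 1
--
--         else:
--             continue
--
--     if count >= 5:
--
--         return num
-- ===== SOURCE B (Python) =====
-- def divisores(num):
--     """
--     Busca todos los divisores de un numero entero introducido, y si tiene 5 o mas la devuelve.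
--     Cuenta divisores por pares (d, num//d) probando solo hasta la raiz cuadrada.
--     """
--     count = 0
--     i = 1
--     while i * i <= num:
--         if num % i == 0:
--             count += 1 if i * i == num else 2
--         i += 1
--     if count >= 5:
--         return num
-- ===== Notes on version B (the rewrite author's own statement) =====
-- stated objective: faster
-- what changed: Counts divisors in pairs (d, num//d) by trial division only up to sqrt(num) instead of scanning every i in 1..num.
import Mathlib
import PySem

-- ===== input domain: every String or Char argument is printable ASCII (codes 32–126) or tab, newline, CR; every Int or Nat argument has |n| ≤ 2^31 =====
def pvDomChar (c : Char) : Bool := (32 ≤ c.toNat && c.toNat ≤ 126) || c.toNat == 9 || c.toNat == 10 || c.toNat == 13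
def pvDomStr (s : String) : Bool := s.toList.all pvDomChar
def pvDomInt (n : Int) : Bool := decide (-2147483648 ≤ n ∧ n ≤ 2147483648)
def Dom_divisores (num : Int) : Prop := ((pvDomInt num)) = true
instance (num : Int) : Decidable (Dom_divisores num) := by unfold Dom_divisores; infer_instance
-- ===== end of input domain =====

-- B counts divisors in pairs (d, num//d) by trial division up to sqrt(num) instead of
-- scanning every i in 1..num (asymptotically faster); return value proved identical.

-- ===== PORT A =====
def divisores (num : Int) : Option Int :=
  let count :=
    (PySem.List.pyRange 1 (num + 1) 1).foldl
      (fun count i => if PySem.Int.mod num i == 0 then count + 1 else count) (0 : Int)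
  if count ≥ 5 then some num else none

-- ===== PORT B =====
-- the 'while i*i <= num' loop; the '1 ≤ i' conjunct is a totality guard only
-- (i starts at 1 and only increases), used by the termination measure.
def divisoresAltGo (num i count : Int) : Int :=
  if h : 1 ≤ i ∧ i * i ≤ num then
    divisoresAltGo num (i + 1)
      (if PySem.Int.mod num i == 0 then count + (if i * i == num then 1 else 2) else count)
  else count
termination_by (num + 1 - i).toNat
decreasing_by
  have hi : i ≤ i * i := le_mul_of_one_le_left (by omega) h.1
  have := h.2
  omega

def divisores_alt (num : Int) : Option Int :=
  let count := divisoresAltGo num 1 0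
  if count ≥ 5 then some num else none

-- ===== PRECONDITION & SPEC =====
def Spec_divisores (num : Int) (out : Option Int) : Prop := out = divisores_alt num
instance (num : Int) (out : Option Int) : Decidable (Spec_divisores num out) := by unfold Spec_divisores; infer_instance

-- ===== CLAIM (what is proved, stated in full; the proofs are below) =====
def Claim_equal_divisores : Prop := ∀ (num : Int), Dom_divisores num → Spec_divisores num (divisores num)

-- ===== LEMMAS AND PROOFS =====

-- weight of a trial index j in B's paired count
def pairWeight (n j : ℕ) : ℕ := if j ∣ n then (if j * j = n then 1 else 2) else 0

-- B's loop computes the paired sum from i up to √n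
theorem altGo_spec (n : ℕ) : ∀ (k i : ℕ) (c : Int), 1 ≤ i → Nat.sqrt n + 1 - i = k →
    divisoresAltGo (n : Int) (i : Int) c
      = c + ((∑ j ∈ Finset.Ico i (Nat.sqrt n + 1), pairWeight n j : ℕ) : Int)
  | 0, i, c, hi, hk => by
    have hgt : Nat.sqrt n < i := by omega
    have hn : n < i * i := by
      have := Nat.sqrt_lt'.mp hgt; rwa [pow_two] at this
    rw [divisoresAltGo,
        dif_neg (fun h => absurd (by exact_mod_cast h.2 : i * i ≤ n) (by omega)),
        Finset.Ico_eq_empty (by omega), Finset.sum_empty]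
    simp
  | (k+1), i, c, hi, hk => by
    have hle : i ≤ Nat.sqrt n := by omega
    have hii : i * i ≤ n := Nat.le_sqrt.mp hle
    rw [divisoresAltGo, dif_pos ⟨by exact_mod_cast hi, by exact_mod_cast hii⟩]
    have hrec := altGo_spec n k (i + 1)
      (if PySem.Int.mod (n : Int) (i : Int) == 0 then
        c + (if (i : Int) * (i : Int) == (n : Int) then 1 else 2) else c)
      (by omega) (by omega)
    push_cast at hrec
    rw [hrec, Finset.sum_eq_sum_Ico_succ_bot (by omega : i < Nat.sqrt n + 1)]
    have hmod : (PySem.Int.mod (n : Int) (i : Int) == 0) = decide (i ∣ n) := by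
      rw [Bool.eq_iff_iff]
      simp [Int.natCast_dvd_natCast]
    have hsqb : ((i : Int) * (i : Int) == (n : Int)) = decide (i * i = n) := by
      rw [Bool.eq_iff_iff]
      simp only [beq_iff_eq, decide_eq_true_eq]
      constructor <;> intro h <;> exact_mod_cast h
    rw [hmod, hsqb]
    by_cases hd : i ∣ n <;> by_cases hs : i * i = n <;>
      simp [pairWeight, hd, hs] <;> ring

-- the paired sum over 1..√n counts all divisors
theorem pairSum_eq_card (n : ℕ) :
    (∑ j ∈ Finset.Ico 1 (Nat.sqrt n + 1), pairWeight n j) = n.divisors.card := by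
  rcases Nat.eq_zero_or_pos n with rfl | hn
  · simp
  -- the trial range 1..√n, filtered by divisibility, is the set of small divisors
  have hfilter : (Finset.Ico 1 (Nat.sqrt n + 1)).filter (· ∣ n)
      = n.divisors.filter (fun d => d * d ≤ n) := by
    ext d
    simp only [Finset.mem_filter, Finset.mem_Ico, Nat.mem_divisors, Nat.lt_succ_iff,
      Nat.le_sqrt]
    constructor
    · rintro ⟨⟨h1, h2⟩, hd⟩; exact ⟨⟨hd, by omega⟩, h2⟩
    · rintro ⟨⟨hd, hn0⟩, h2⟩
      exact ⟨⟨Nat.pos_of_dvd_of_pos hd hn, h2⟩, hd⟩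
  have hsum : ∑ j ∈ Finset.Ico 1 (Nat.sqrt n + 1), pairWeight n j
      = ∑ d ∈ n.divisors.filter (fun d => d * d ≤ n), (if d * d = n then 1 else 2) := by
    rw [← hfilter, Finset.sum_filter]
    exact Finset.sum_congr rfl (fun j _ => by
      by_cases h : j ∣ n <;> simp [pairWeight, h])
  have hsplit : (∑ d ∈ n.divisors.filter (fun d => d * d ≤ n), (if d * d = n then 1 else 2))
      = (n.divisors.filter (fun d => d * d ≤ n)).card
        + ((n.divisors.filter (fun d => d * d ≤ n)).filter (fun d => ¬ d * d = n)).card := by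
    rw [Finset.sum_congr rfl (fun d _ => by
        by_cases h : d * d = n <;> simp [h] : ∀ d ∈ n.divisors.filter (fun d => d * d ≤ n),
          (if d * d = n then 1 else 2) = 1 + (if ¬ d * d = n then 1 else 0)),
      Finset.sum_add_distrib, Finset.sum_const, smul_eq_mul, mul_one, Finset.card_filter]
    congr 1
    rw [Finset.card_filter]
  have htot : n.divisors.card = (n.divisors.filter (fun d => d * d ≤ n)).card
      + (n.divisors.filter (fun d => ¬ d * d ≤ n)).card :=
    (Finset.card_filter_add_card_filter_not (fun d => d * d ≤ n)).symm
  have hbij : (n.divisors.filter (fun d => ¬ d * d ≤ n)).card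
      = ((n.divisors.filter (fun d => d * d ≤ n)).filter (fun d => ¬ d * d = n)).card := by
    apply Finset.card_bij' (i := fun d _ => n / d) (j := fun d _ => n / d)
    · -- maps large divisors to strictly small ones
      intro d hd
      rw [Finset.mem_filter] at hd
      obtain ⟨hdiv, hlarge⟩ := hd
      rw [Nat.mem_divisors] at hdiv
      obtain ⟨⟨c, hc⟩, hn0⟩ := hdiv
      have hd0 : 0 < d := Nat.pos_of_dvd_of_pos ⟨c, hc⟩ hn
      have hq : n / d = c := by rw [hc, Nat.mul_div_cancel_left _ hd0]
      have hcd : c < d := by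
        by_contra hcd
        exact hlarge (by nlinarith)
      have hc0 : 0 < c := by
        rcases Nat.eq_zero_or_pos c with rfl | h
        · omega
        · exact h
      simp only [Finset.mem_filter, Nat.mem_divisors, hq]
      refine ⟨⟨⟨⟨d, by rw [hc]; ring⟩, hn0⟩, by nlinarith⟩, by nlinarith⟩
    · -- maps strictly small divisors to large ones
      intro d hd
      rw [Finset.mem_filter, Finset.mem_filter] at hd
      obtain ⟨⟨hdiv, hsmall⟩, hne⟩ := hd
      rw [Nat.mem_divisors] at hdiv
      obtain ⟨⟨c, hc⟩, hn0⟩ := hdiv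
      have hd0 : 0 < d := Nat.pos_of_dvd_of_pos ⟨c, hc⟩ hn
      have hq : n / d = c := by rw [hc, Nat.mul_div_cancel_left _ hd0]
      have hdc : d < c := by
        rcases Nat.lt_trichotomy d c with h | h | h
        · exact h
        · exact absurd (by rw [hc, ← h]) hne
        · exact absurd (by nlinarith : n < d * d) (by omega)
      simp only [Finset.mem_filter, Nat.mem_divisors, hq]
      exact ⟨⟨⟨d, by rw [hc]; ring⟩, hn0⟩, by nlinarith⟩
    · intro d hd
      rw [Finset.mem_filter, Nat.mem_divisors] at hd
      exact Nat.div_div_self hd.1.1 hd.1.2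
    · intro d hd
      rw [Finset.mem_filter, Finset.mem_filter, Nat.mem_divisors] at hd
      exact Nat.div_div_self hd.1.1.1 hd.1.1.2
  omega

-- A's loop counts the divisors one by one
-- counting 1..m against divisibility, Finset form
theorem countRange_eq (n : ℕ) : ∀ (m : ℕ),
    (List.range m).countP (fun k => decide ((k + 1) ∣ n))
      = ((Finset.Ico 1 (m + 1)).filter (· ∣ n)).card
  | 0 => by simp
  | (m+1) => by
    rw [List.range_succ, List.countP_append, countRange_eq n m,
        show Finset.Ico 1 (m + 1 + 1) = insert (m + 1) (Finset.Ico 1 (m + 1)) from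
          Nat.Ico_succ_right_eq_insert_Ico (by omega),
        Finset.filter_insert]
    by_cases hd : (m + 1) ∣ n
    · rw [if_pos hd, Finset.card_insert_of_notMem (by simp)]
      simp [hd]
    · rw [if_neg hd]
      simp [hd]

theorem countA_eq_card (n : ℕ) :
    (PySem.List.pyRange 1 ((n : Int) + 1) 1).countP
      (fun i => PySem.Int.mod (n : Int) i == 0) = n.divisors.card := by
  rw [PySem.List.pyRange_one]
  have h1 : ((n : Int) + 1 - 1).toNat = n := by simp
  rw [h1, List.countP_map]
  have hp : ((fun i => PySem.Int.mod (n : Int) i == 0) ∘ fun k : ℕ => (1 : Int) + (k : Int))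
      = fun k : ℕ => decide ((k + 1) ∣ n) := by
    funext k
    show (PySem.Int.mod (n : Int) (1 + (k : Int)) == 0) = decide ((k + 1) ∣ n)
    rw [Bool.eq_iff_iff]
    have : (1 : Int) + (k : Int) = ((k + 1 : ℕ) : Int) := by push_cast; ring
    simp only [this, beq_iff_eq, decide_eq_true_eq, PySem.Int.mod_eq_zero_iff_dvd]
    constructor <;> intro h <;> exact_mod_cast h
  rw [hp, countRange_eq n n]
  rfl

-- ===== VERDICT (by name: the statement is the Claim_ definition above) =====
theorem divisores_spec : Claim_equal_divisores := by
  intro num _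
  unfold Spec_divisores divisores divisores_alt
  rw [PySem.List.foldl_if_add_one]
  by_cases h0 : 0 ≤ num
  · obtain ⟨n, rfl⟩ := Int.eq_ofNat_of_zero_le h0
    show (if (0 + ((PySem.List.pyRange 1 ((n : Int) + 1) 1).countP
        (fun i => PySem.Int.mod (n : Int) i == 0) : Int)) ≥ 5 then some ((n : Int)) else none)
      = if divisoresAltGo (n : Int) 1 0 ≥ 5 then some ((n : Int)) else none
    have h := altGo_spec n (Nat.sqrt n + 1 - 1) 1 0 le_rfl rfl
    rw [Nat.cast_one] at h
    rw [h, countA_eq_card n, pairSum_eq_card n]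
  · -- negative input: both loops do nothing
    rw [PySem.List.pyRange_one_eq_nil (by omega), divisoresAltGo,
        dif_neg (by intro h; exact absurd h.2 (by omega))]
    simp
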